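-- pv_equiv track=rewrite | github.com/snafus/fts-transfer-tester | fts_framework/metrics/engine.py | _retry_distribution
-- ===== SOURCE A (Python) =====
-- def _retry_distribution(retry_records):
--     # type: (list) -> dict
--     """Count retry records by file (how many retries each file had).
--
--     Returns:
--         dict: Mapping of retry-count-as-string → number-of-files with that
--             count.  E.g. ``{"0": 5, "1": 2, "2": 1}`` means 5 files had
--             0 retries (absent from retry_records), 2 had 1, 1 had 2.
--
--             Note: files with 0 retries are not in *retry_records* so the
--             ``"0"`` key is omitted from this dict; the caller can infer it.
--     """
--     counts = {}  # type: dict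
--     for rec in retry_records:
--         fid = rec["file_id"]
--         counts[fid] = counts.get(fid, 0) + 1
--
--     dist = {}  # type: dict
--     for count in counts.values():
--         key = str(count)
--         dist[key] = dist.get(key, 0) + 1
--     return dist
-- ===== SOURCE B (Python) =====
-- def _retry_distribution(retry_records):
--     # type: (list) -> dict
--     """Same result as A, with no counting dict at all: repeatedly peel off
--     every occurrence of the first remaining file id by filtering the list;
--     the length drop IS that file's retry count, bucketed immediately."""
--     fids = [rec["file_id"] for rec in retry_records]
--     dist = {}
--     while fids:
--         fid = fids[0]
--         rest = [x for x in fids if x != fid]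
--         key = str(len(fids) - len(rest))
--         dist[key] = dist.get(key, 0) + 1
--         fids = rest
--     return dist
-- ===== Notes on version B (the rewrite author's own statement) =====
-- stated objective: alternative
-- what changed: B has no counting dict at all: it repeatedly peels off every occurrence of the first remaining file id by filtering the list, reads that file's retry count off the length drop, and buckets it into dist immediately.
import Mathlib
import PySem

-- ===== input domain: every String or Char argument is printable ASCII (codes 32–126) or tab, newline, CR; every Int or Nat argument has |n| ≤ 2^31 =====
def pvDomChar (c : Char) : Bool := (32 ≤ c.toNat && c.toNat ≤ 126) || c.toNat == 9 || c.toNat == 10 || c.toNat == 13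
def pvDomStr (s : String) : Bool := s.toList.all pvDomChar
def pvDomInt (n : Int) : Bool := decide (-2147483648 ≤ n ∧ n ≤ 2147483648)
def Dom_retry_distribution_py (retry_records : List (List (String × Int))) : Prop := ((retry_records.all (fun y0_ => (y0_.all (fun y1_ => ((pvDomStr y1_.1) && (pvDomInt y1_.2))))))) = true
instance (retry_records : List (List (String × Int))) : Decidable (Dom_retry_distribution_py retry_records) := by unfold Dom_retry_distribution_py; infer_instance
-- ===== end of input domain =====

-- B drops A's per-file counting dict entirely: it repeatedly peels off every occurrence
-- of the first remaining file id by filtering the list, reads that file's retry count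
-- off the length drop, and buckets it immediately (alternative decomposition, not faster).

-- ===== PORT A =====
-- rec["file_id"]: the record's pairs form a dict (later duplicate keys overwrite), then lookup.
def pvRecFid (rec : List (String × Int)) : Int :=
  ((PySem.Dict.ofList rec).get? "file_id").getD 0

def retry_distribution_py (retry_records : List (List (String × Int))) : List (String × Int) :=
  let counts := retry_records.foldl
    (fun d rec => let fid := pvRecFid rec; d.insert fid (d.getD fid 0 + 1))
    (PySem.Dict.empty : PySem.Dict Int Int)
  let dist := counts.values.foldl
    (fun d c => let key := PySem.Int.toStr c; d.insert key (d.getD key 0 + 1))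
    (PySem.Dict.empty : PySem.Dict String Int)
  dist.items

-- ===== PORT B =====
-- the 'while fids:' loop of Source B: peel all occurrences of fids[0], bucket the length drop
def pvPeel : List Int → PySem.Dict String Int → PySem.Dict String Int
  | [], dist => dist
  | fid :: tl, dist =>
      let rest := (fid :: tl).filter (fun x => x != fid)
      let key := PySem.Int.toStr (((fid :: tl).length : Int) - (rest.length : Int))
      pvPeel rest (dist.insert key (dist.getD key 0 + 1))
termination_by l _ => l.length
decreasing_by
  simp only [List.filter_cons, bne_self_eq_false]
  exact Nat.lt_succ_of_le (List.length_filter_le _ _)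

def retry_distribution_py_alt (retry_records : List (List (String × Int))) : List (String × Int) :=
  let fids := retry_records.map pvRecFid
  (pvPeel fids PySem.Dict.empty).items

-- ===== PRECONDITION & SPEC =====
-- Pre_ excludes records missing the "file_id" key, on which both Pythons raise KeyError.
def Pre_retry_distribution_py (retry_records : List (List (String × Int))) : Prop :=
  ∀ rec ∈ retry_records, "file_id" ∈ rec.map (·.1)
instance (retry_records : List (List (String × Int))) : Decidable (Pre_retry_distribution_py retry_records) := by
  unfold Pre_retry_distribution_py; infer_instance
def pvWitness_retry_distribution_py : (List (List (String × Int))) :=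
  [[("file_id", 7)], [("file_id", 7), ("attempt", 1)], [("file_id", 3)]]
def Spec_retry_distribution_py (retry_records : List (List (String × Int))) (out : List (String × Int)) : Prop := out = retry_distribution_py_alt retry_records
instance (retry_records : List (List (String × Int))) (out : List (String × Int)) : Decidable (Spec_retry_distribution_py retry_records out) := by unfold Spec_retry_distribution_py; infer_instance

-- ===== CLAIM (what is proved, stated in full; the proofs are below) =====
def Claim_equal_retry_distribution_py : Prop := ∀ (retry_records : List (List (String × Int))), Dom_retry_distribution_py retry_records → Pre_retry_distribution_py retry_records → Spec_retry_distribution_py retry_records (retry_distribution_py retry_records)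

-- ===== LEMMAS AND PROOFS =====

-- adding elements whose value already sits in the set is a no-op for the whole fold
lemma pv_foldl_add_filter {x : Int} (l : List Int) (s : PySem.Set Int) (hx : x ∈ s) :
    l.foldl PySem.Set.add s = (l.filter (fun y => y != x)).foldl PySem.Set.add s := by
  induction l generalizing s with
  | nil => rfl
  | cons y t ih =>
    by_cases hyx : y = x
    · subst hyx
      simp only [List.filter_cons, bne_self_eq_false, List.foldl_cons]
      rw [show PySem.Set.add s y = s from by
        simp [PySem.Set.add, PySem.Set.contains, hx]]
      exact ih s hx
    · rw [List.filter_cons, if_pos (by simpa using hyx), List.foldl_cons, List.foldl_cons]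
      exact ih (PySem.Set.add s y) (by simp [PySem.Set.add]; split <;> simp [hx])

-- a head value occurring nowhere in the rest of the fold commutes out
lemma pv_foldl_add_cons {a : Int} (m : List Int) (s : List Int) (hm : ∀ x ∈ m, x ≠ a) :
    m.foldl PySem.Set.add (a :: s) = a :: m.foldl PySem.Set.add s := by
  induction m generalizing s with
  | nil => rfl
  | cons y t ih =>
    have hya : y ≠ a := hm y (List.mem_cons_self ..)
    have hstep : PySem.Set.add (a :: s) y = a :: PySem.Set.add s y := by
      unfold PySem.Set.add
      simp only [PySem.Set.contains, List.contains_cons]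
      rw [show (y == a) = false from by simpa using hya]
      split <;> simp_all
    rw [List.foldl_cons, List.foldl_cons, hstep, ih _ (fun x hx => hm x (by simp [hx]))]

-- first-occurrence dedup peels its head: dedup (a :: tl) = a :: dedup (tl minus a)
lemma pv_dedup_cons (a : Int) (tl : List Int) :
    PySem.List.dedup (a :: tl) = a :: PySem.List.dedup (tl.filter (fun x => x != a)) := by
  have h0 : PySem.List.dedup (a :: tl) = tl.foldl PySem.Set.add [a] := by
    rw [PySem.List.dedup_eq_ofList, PySem.Set.ofList_eq_foldl, List.foldl_cons]; rfl
  have hm : ∀ x ∈ tl.filter (fun y => y != a), x ≠ a :=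
    fun x hx => by have h := List.of_mem_filter hx; simpa using h
  rw [h0, pv_foldl_add_filter (x := a) tl [a] (by simp)]
  rw [pv_foldl_add_cons (a := a) (tl.filter (fun y => y != a)) [] hm]
  rw [PySem.List.dedup_eq_ofList, PySem.Set.ofList_eq_foldl]

-- the length drop of the peel IS the head's multiplicity
lemma pv_count_add_len (a : Int) (l : List Int) :
    l.count a + (l.filter (fun x => x != a)).length = l.length := by
  induction l with
  | nil => simp
  | cons y t ih => by_cases h : y = a <;> simp [h] <;> omega

-- the peel loop computes the histogram fold of the per-file counts in first-occurrence order
lemma pv_peel_eq (fids : List Int) (d : PySem.Dict String Int) :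
    pvPeel fids d
      = ((PySem.List.dedup fids).map (fun k => ((fids.count k : Int)))).foldl
          (fun d c => d.insert (PySem.Int.toStr c) (d.getD (PySem.Int.toStr c) 0 + 1)) d := by
  match fids with
  | [] =>
    rw [pvPeel]
    simp [PySem.List.dedup_eq_ofList, PySem.Set.ofList_eq_foldl]
  | fid :: tl =>
    have hrest : (fid :: tl).filter (fun x => x != fid) = tl.filter (fun x => x != fid) := by
      simp
    rw [pvPeel, pv_dedup_cons]
    simp only [hrest, List.map_cons, List.foldl_cons]
    have hkey : (((fid :: tl).length : Int) - ((tl.filter (fun x => x != fid)).length : Int))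
        = (((fid :: tl).count fid : Nat) : Int) := by
      have := pv_count_add_len fid (fid :: tl)
      rw [hrest] at this; push_cast [← this]; ring
    rw [hkey]
    have hcong :
        (PySem.List.dedup (tl.filter (fun x => x != fid))).map
            (fun k => (((fid :: tl).count k : Nat) : Int))
          = (PySem.List.dedup (tl.filter (fun x => x != fid))).map
            (fun k => (((tl.filter (fun x => x != fid)).count k : Nat) : Int)) := by
      apply List.map_congr_left
      intro k hk
      have hkmem : k ∈ tl.filter (fun x => x != fid) := by
        rw [← PySem.List.mem_dedup]; exact hk
      have hkne : k ≠ fid := by simpa using (List.of_mem_filter hkmem)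
      rw [List.count_filter (by simpa using hkne)]
      simp [Ne.symm hkne]
    rw [hcong, pv_peel_eq (tl.filter (fun x => x != fid)) _]
termination_by fids.length
decreasing_by
  exact Nat.lt_succ_of_le (List.length_filter_le _ _)

-- ===== VERDICT (by name: the statement is the Claim_ definition above) =====
theorem retry_distribution_py_spec : Claim_equal_retry_distribution_py := by
  intro retry_records _ _
  unfold Spec_retry_distribution_py retry_distribution_py retry_distribution_py_alt
  dsimp only
  rw [show (List.foldl (fun d rec => d.insert (pvRecFid rec) (d.getD (pvRecFid rec) 0 + 1))
        (PySem.Dict.empty : PySem.Dict Int Int) retry_records)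
      = PySem.Dict.counter (retry_records.map pvRecFid) from by
    rw [← PySem.Dict.foldl_insert_getD_add_one_eq_counter, List.foldl_map]]
  rw [pv_peel_eq]
  simp only [PySem.Dict.values, PySem.Dict.items_counter, List.map_map, List.foldl_map,
    PySem.List.dedup_eq_ofList]
  rfl
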